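-- pv_equiv track=rewrite | github.com/sadipgiri/Computational-Linguistics-NLP | Ngram Models Proj/bigrams.py | bigrams_counts_dictionary
-- ===== SOURCE A (Python) =====
-- def bigrams_counts_dictionary(bigrams_tuples_list):
--     '''
--         takes in list of bigrams tuples
--         creates dictionary with counts for bigrams
--         e.g. [('the', 'cat'), ('cat', 'was'), ('was', 'the'), ('the', 'cute'), ('cute', '.')] ->
--             -> {'the': {'cat': 1, 'cute': 1}, 'cat': {'was': 1}, 'was': {'the': 1}, 'cute': {'.': 1}}
--     '''
--     bigrams_counts = {}
--     for i,j in bigrams_tuples_list: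
--         if i not in bigrams_counts:
--             bigrams_counts[i] = {}
--         if j not in bigrams_counts[i]:
--             bigrams_counts[i][j] = 1
--         else:
--             bigrams_counts[i][j] += 1
--     return bigrams_counts
-- ===== SOURCE B (Python) =====
-- def bigrams_counts_dictionary(bigrams_tuples_list):
--     # Two-phase: flat pair-count table first, then distribute into the nested dict.
--     pair_counts = {}
--     for i, j in bigrams_tuples_list:
--         pair_counts[(i, j)] = pair_counts.get((i, j), 0) + 1
--     result = {}
--     for (i, j), c in pair_counts.items():
--         result.setdefault(i, {})[j] = c
--     return result
-- ===== Notes on version B (the rewrite author's own statement) =====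
-- stated objective: alternative
-- what changed: A builds the nested dict incrementally with membership tests and in-place counter updates per bigram; B instead counts each (i,j) pair once into a flat table in one pass and then distributes the finished pair-counts into the nested dict in a second, differently-shaped pass.
import Mathlib
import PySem

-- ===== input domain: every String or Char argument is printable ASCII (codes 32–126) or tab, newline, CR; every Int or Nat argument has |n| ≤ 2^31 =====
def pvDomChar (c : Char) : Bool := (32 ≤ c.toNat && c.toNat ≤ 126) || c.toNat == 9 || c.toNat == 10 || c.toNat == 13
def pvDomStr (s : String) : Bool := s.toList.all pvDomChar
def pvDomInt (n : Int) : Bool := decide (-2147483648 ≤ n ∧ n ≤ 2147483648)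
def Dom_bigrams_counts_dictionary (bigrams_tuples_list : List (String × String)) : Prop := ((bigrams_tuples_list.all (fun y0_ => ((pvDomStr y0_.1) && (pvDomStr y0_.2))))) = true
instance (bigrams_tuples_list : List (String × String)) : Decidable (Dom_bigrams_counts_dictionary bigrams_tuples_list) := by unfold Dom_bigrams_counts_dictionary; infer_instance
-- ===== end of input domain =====

-- B replaces A's per-element nested-dict updates by a two-phase alternative: a flat (i,j)→count
-- table built in one pass, then distributed into the nested dict in a second pass; same output.

-- ===== PORT A =====
def bigrams_counts_dictionary (bigrams_tuples_list : List (String × String)) : List (String × List (String × Int)) :=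
  let bigrams_counts : PySem.Dict String (PySem.Dict String Int) :=
    bigrams_tuples_list.foldl (fun bc p =>
      let bc := if bc.contains p.1 then bc else bc.insert p.1 PySem.Dict.empty
      let inner := bc.getD p.1 PySem.Dict.empty
      if inner.contains p.2 then bc.insert p.1 (inner.insert p.2 (inner.getD p.2 0 + 1))
      else bc.insert p.1 (inner.insert p.2 1)) PySem.Dict.empty
  bigrams_counts.items.map (fun q => (q.1, q.2.items))

-- ===== PORT B =====
def bigrams_counts_dictionary_alt (bigrams_tuples_list : List (String × String)) : List (String × List (String × Int)) :=
  let pair_counts : PySem.Dict (String × String) Int :=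
    bigrams_tuples_list.foldl (fun d p => d.insert p (d.getD p 0 + 1)) PySem.Dict.empty
  let result : PySem.Dict String (PySem.Dict String Int) :=
    pair_counts.items.foldl (fun r q =>
      let r := r.setdefault q.1.1 PySem.Dict.empty
      r.insert q.1.1 ((r.getD q.1.1 PySem.Dict.empty).insert q.1.2 q.2)) PySem.Dict.empty
  result.items.map (fun q => (q.1, q.2.items))

-- ===== PRECONDITION & SPEC =====
def Spec_bigrams_counts_dictionary (bigrams_tuples_list : List (String × String)) (out : List (String × List (String × Int))) : Prop := out = bigrams_counts_dictionary_alt bigrams_tuples_list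
instance (bigrams_tuples_list : List (String × String)) (out : List (String × List (String × Int))) : Decidable (Spec_bigrams_counts_dictionary bigrams_tuples_list out) := by unfold Spec_bigrams_counts_dictionary; infer_instance

-- ===== CLAIM (what is proved, stated in full; the proofs are below) =====
def Claim_equal_bigrams_counts_dictionary : Prop := ∀ (bigrams_tuples_list : List (String × String)), Dom_bigrams_counts_dictionary bigrams_tuples_list → Spec_bigrams_counts_dictionary bigrams_tuples_list (bigrams_counts_dictionary bigrams_tuples_list)

-- ===== LEMMAS AND PROOFS =====

-- A's loop body, named for the proofs (definitionally the lambda in port A).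
def aStep (bc : PySem.Dict String (PySem.Dict String Int)) (p : String × String) : PySem.Dict String (PySem.Dict String Int) :=
  let bc := if bc.contains p.1 then bc else bc.insert p.1 PySem.Dict.empty
  let inner := bc.getD p.1 PySem.Dict.empty
  if inner.contains p.2 then bc.insert p.1 (inner.insert p.2 (inner.getD p.2 0 + 1))
  else bc.insert p.1 (inner.insert p.2 1)

-- B's second-phase loop body, named for the proofs (definitionally the lambda in port B).
def dStep (r : PySem.Dict String (PySem.Dict String Int)) (q : (String × String) × Int) : PySem.Dict String (PySem.Dict String Int) :=
  let r := r.setdefault q.1.1 PySem.Dict.empty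
  r.insert q.1.1 ((r.getD q.1.1 PySem.Dict.empty).insert q.1.2 q.2)

theorem portA_eq (l : List (String × String)) :
    bigrams_counts_dictionary l = ((l.foldl aStep PySem.Dict.empty).items).map (fun q => (q.1, q.2.items)) := rfl

theorem portB_eq (l : List (String × String)) :
    bigrams_counts_dictionary_alt l
      = (((PySem.Dict.counter l).items).foldl dStep PySem.Dict.empty).items.map (fun q => (q.1, q.2.items)) := by
  unfold bigrams_counts_dictionary_alt
  rw [PySem.Dict.foldl_insert_getD_add_one_eq_counter]
  rfl

-- Both loop bodies collapse to a single canonical insert.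
theorem aStep_eq (bc : PySem.Dict String (PySem.Dict String Int)) (p : String × String) :
    aStep bc p = bc.insert p.1 ((bc.getD p.1 PySem.Dict.empty).insert p.2 ((bc.getD p.1 PySem.Dict.empty).getD p.2 0 + 1)) := by
  unfold aStep
  cases hc : bc.contains p.1 with
  | true =>
    simp only [if_true]
    cases hj : (bc.getD p.1 PySem.Dict.empty).contains p.2 with
    | true => simp
    | false => simp [PySem.Dict.getD_of_not_contains _ _ hj]
  | false =>
    simp [pysem, PySem.Dict.getD_of_not_contains _ _ hc]

theorem dStep_eq (r : PySem.Dict String (PySem.Dict String Int)) (q : (String × String) × Int) :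
    dStep r q = r.insert q.1.1 ((r.getD q.1.1 PySem.Dict.empty).insert q.1.2 q.2) := by
  unfold dStep
  cases hc : r.contains q.1.1 with
  | true => simp [pysem, PySem.Dict.setdefault_of_contains, hc]
  | false => simp [pysem, PySem.Dict.setdefault_of_not_contains, hc, PySem.Dict.getD_of_not_contains _ _ hc]

theorem aStep_funext : aStep = fun (d : PySem.Dict String (PySem.Dict String Int)) (p : String × String) =>
    d.insert p.1 ((d.getD p.1 PySem.Dict.empty).insert p.2 ((d.getD p.1 PySem.Dict.empty).getD p.2 0 + 1)) :=
  funext fun d => funext fun p => aStep_eq d p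

theorem dStep_funext : dStep = fun (r : PySem.Dict String (PySem.Dict String Int)) (q : (String × String) × Int) =>
    r.insert q.1.1 ((r.getD q.1.1 PySem.Dict.empty).insert q.1.2 q.2) :=
  funext fun r => funext fun q => dStep_eq r q

theorem keysA (l : List (String × String)) :
    (l.foldl aStep PySem.Dict.empty).keys = PySem.Set.ofList (l.map (fun p => p.1)) := by
  rw [aStep_funext, PySem.Dict.keys_foldl_insert_key, PySem.Dict.keys_empty, PySem.Set.update_nil_left]

theorem keysB (t : List ((String × String) × Int)) :
    (t.foldl dStep PySem.Dict.empty).keys = PySem.Set.ofList (t.map (fun q => q.1.1)) := by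
  rw [dStep_funext, PySem.Dict.keys_foldl_insert_key, PySem.Dict.keys_empty, PySem.Set.update_nil_left]

-- The inner dict A's loop leaves at key i is determined by the bigrams whose first word is i.
theorem getD_foldl_aStep (t : List (String × String)) (d : PySem.Dict String (PySem.Dict String Int)) (i : String) :
    (t.foldl aStep d).getD i PySem.Dict.empty
      = (t.filter (fun p => p.1 == i)).foldl (fun inn p => inn.insert p.2 (inn.getD p.2 0 + 1)) (d.getD i PySem.Dict.empty) := by
  induction t generalizing d with
  | nil => rfl
  | cons p t ih =>
    rw [List.foldl_cons, ih, aStep_eq, List.filter_cons]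
    by_cases h : p.1 = i
    · subst h; simp
    · simp [PySem.Dict.getD_insert, h, Ne.symm h]

-- The inner dict B's second pass leaves at key i is determined by the table rows whose key's first word is i.
theorem getD_foldl_dStep (t : List ((String × String) × Int)) (d : PySem.Dict String (PySem.Dict String Int)) (i : String) :
    (t.foldl dStep d).getD i PySem.Dict.empty
      = (t.filter (fun q => q.1.1 == i)).foldl (fun inn q => inn.insert q.1.2 q.2) (d.getD i PySem.Dict.empty) := by
  induction t generalizing d with
  | nil => rfl
  | cons q t ih =>
    rw [List.foldl_cons, ih, dStep_eq, List.filter_cons]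
    by_cases h : q.1.1 = i
    · subst h; simp
    · simp [PySem.Dict.getD_insert, h, Ne.symm h]

theorem ofList_map_ofList {α β : Type} [BEq α] [LawfulBEq α] [BEq β] [LawfulBEq β] (f : α → β) (xs : List α) :
    PySem.Set.ofList ((PySem.Set.ofList xs).map f) = PySem.Set.ofList (xs.map f) := by
  induction xs using List.reverseRecOn with
  | nil => rfl
  | append_singleton xs x ih =>
    rw [PySem.Set.ofList_append_singleton, List.map_append, List.map_singleton,
        PySem.Set.ofList_append_singleton, ← ih]
    by_cases hx : x ∈ xs
    · have h1 : x ∈ PySem.Set.ofList xs := (PySem.Set.mem_ofList _ _).mpr hx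
      have h2 : f x ∈ PySem.Set.ofList ((PySem.Set.ofList xs).map f) :=
        (PySem.Set.mem_ofList _ _).mpr (List.mem_map_of_mem h1)
      rw [PySem.Set.add_of_mem h1, PySem.Set.add_of_mem h2]
    · have h1 : x ∉ PySem.Set.ofList xs := fun hmem => hx ((PySem.Set.mem_ofList _ _).mp hmem)
      rw [PySem.Set.add_of_not_mem h1, List.map_append, List.map_singleton,
          PySem.Set.ofList_append_singleton]

theorem ofList_filter {α : Type} [BEq α] [LawfulBEq α] (P : α → Bool) (xs : List α) :
    PySem.Set.ofList (xs.filter P) = (PySem.Set.ofList xs).filter P := by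
  induction xs using List.reverseRecOn with
  | nil => rfl
  | append_singleton xs x ih =>
    rw [List.filter_append, PySem.Set.ofList_append_singleton]
    by_cases hx : x ∈ xs
    · have h1 : x ∈ PySem.Set.ofList xs := (PySem.Set.mem_ofList _ _).mpr hx
      rw [PySem.Set.add_of_mem h1, ← ih]
      by_cases hp : P x = true
      · have hfx : List.filter P [x] = [x] := by simp [hp]
        rw [hfx, PySem.Set.ofList_append_singleton, PySem.Set.add_of_mem]
        exact (PySem.Set.mem_ofList _ _).mpr (List.mem_filter.mpr ⟨hx, hp⟩)
      · have hfx : List.filter P [x] = [] := by simp [hp]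
        rw [hfx, List.append_nil]
    · have h1 : x ∉ PySem.Set.ofList xs := fun hmem => hx ((PySem.Set.mem_ofList _ _).mp hmem)
      rw [PySem.Set.add_of_not_mem h1, List.filter_append, ← ih]
      by_cases hp : P x = true
      · have hfx : List.filter P [x] = [x] := by simp [hp]
        rw [hfx, PySem.Set.ofList_append_singleton, PySem.Set.add_of_not_mem]
        intro hmem
        exact hx (List.mem_of_mem_filter ((PySem.Set.mem_ofList _ _).mp hmem))
      · have hfx : List.filter P [x] = [] := by simp [hp]
        rw [hfx, List.append_nil, List.append_nil]

theorem ofList_map_injOn {α β : Type} [BEq α] [LawfulBEq α] [BEq β] [LawfulBEq β] (f : α → β) (xs : List α)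
    (hinj : ∀ x ∈ xs, ∀ y ∈ xs, f x = f y → x = y) :
    PySem.Set.ofList (xs.map f) = (PySem.Set.ofList xs).map f := by
  induction xs using List.reverseRecOn with
  | nil => rfl
  | append_singleton xs x ih =>
    have hinj' : ∀ a ∈ xs, ∀ b ∈ xs, f a = f b → a = b := fun a ha b hb =>
      hinj a (List.mem_append_left _ ha) b (List.mem_append_left _ hb)
    rw [List.map_append, List.map_singleton, PySem.Set.ofList_append_singleton,
        PySem.Set.ofList_append_singleton, ih hinj']
    by_cases hx : x ∈ xs
    · have h1 : x ∈ PySem.Set.ofList xs := (PySem.Set.mem_ofList _ _).mpr hx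
      rw [PySem.Set.add_of_mem h1, PySem.Set.add_of_mem (List.mem_map_of_mem h1)]
    · have h1 : x ∉ PySem.Set.ofList xs := fun hmem => hx ((PySem.Set.mem_ofList _ _).mp hmem)
      have h2 : f x ∉ (PySem.Set.ofList xs).map f := by
        intro hmem
        obtain ⟨y, hy, hfy⟩ := List.mem_map.mp hmem
        have hy' : y ∈ xs := (PySem.Set.mem_ofList _ _).mp hy
        have hyx : y = x :=
          hinj y (List.mem_append_left _ hy') x (List.mem_append_right _ (List.mem_singleton.mpr rfl)) hfy
        exact hx (hyx ▸ hy')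
      rw [PySem.Set.add_of_not_mem h1, PySem.Set.add_of_not_mem h2, List.map_append, List.map_singleton]

-- Counting j among the second components of the bigrams starting with i counts the pair (i, j) itself.
theorem count_snd_filter (l : List (String × String)) (i : String) (p : String × String) (hp : p.1 = i) :
    ((l.filter (fun q => q.1 == i)).map (fun q => q.2)).count p.2 = l.count p := by
  subst hp
  rw [List.count_eq_countP, List.countP_map, List.countP_filter, List.count_eq_countP]
  apply List.countP_congr
  intro q _
  simp only [Function.comp, beq_iff_eq, Bool.and_eq_true, Prod.ext_iff]
  tauto

theorem innerA (l : List (String × String)) (i : String) :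
    ((l.foldl aStep PySem.Dict.empty).getD i PySem.Dict.empty).items
      = (PySem.Set.ofList ((l.filter (fun p => p.1 == i)).map (fun p => p.2))).map
          (fun j => (j, (((l.filter (fun p => p.1 == i)).map (fun p => p.2)).count j : Int))) := by
  have hfold : List.foldl (fun (inn : PySem.Dict String Int) (j : String) => inn.insert j (inn.getD j 0 + 1))
        PySem.Dict.empty ((l.filter (fun p => p.1 == i)).map (fun p => p.2))
      = List.foldl (fun (inn : PySem.Dict String Int) (p : String × String) => inn.insert p.2 (inn.getD p.2 0 + 1))
        PySem.Dict.empty (l.filter (fun p => p.1 == i)) := List.foldl_map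
  rw [getD_foldl_aStep, PySem.Dict.getD_empty, ← hfold,
      PySem.Dict.foldl_insert_getD_add_one_eq_counter, PySem.Dict.items_counter]

theorem innerB (l : List (String × String)) (i : String) :
    ((((PySem.Dict.counter l).items).foldl dStep PySem.Dict.empty).getD i PySem.Dict.empty).items
      = ((PySem.Set.ofList l).filter (fun p => p.1 == i)).map (fun p => (p.2, (l.count p : Int))) := by
  rw [getD_foldl_dStep, PySem.Dict.getD_empty, PySem.Dict.items_counter, List.filter_map]
  have hcomp : ((fun q : (String × String) × Int => q.1.1 == i) ∘ (fun k : String × String => (k, (List.count k l : Int))))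
      = fun k : String × String => k.1 == i := rfl
  rw [hcomp]
  have h1 : ∀ a ∈ ((PySem.Set.ofList l).filter (fun k : String × String => k.1 == i)).map
        (fun k : String × String => (k, (List.count k l : Int))),
      (PySem.Dict.empty : PySem.Dict String Int).contains a.1.2 = false :=
    fun a _ => PySem.Dict.contains_empty _
  have h2 : ((((PySem.Set.ofList l).filter (fun k : String × String => k.1 == i)).map
        (fun k : String × String => (k, (List.count k l : Int)))).map
          (fun q : (String × String) × Int => q.1.2)).Nodup := by
    rw [List.map_map]
    refine List.Nodup.map_on ?_ (List.Nodup.filter _ (PySem.Set.nodup_ofList l))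
    intro x hx y hy hxy
    have hx1 : x.1 = i := by simpa using (List.mem_filter.mp hx).2
    have hy1 : y.1 = i := by simpa using (List.mem_filter.mp hy).2
    exact Prod.ext_iff.mpr ⟨hx1.trans hy1.symm, hxy⟩
  have hfresh := PySem.Dict.items_foldl_insert_fresh
    (((PySem.Set.ofList l).filter (fun k : String × String => k.1 == i)).map
      (fun k : String × String => (k, (List.count k l : Int))))
    (fun q : (String × String) × Int => q.1.2) (fun q : (String × String) × Int => q.2)
    PySem.Dict.empty h1 h2
  rw [hfresh, List.map_map]
  rfl

theorem inner_eq (l : List (String × String)) (i : String) :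
    (PySem.Set.ofList ((l.filter (fun p => p.1 == i)).map (fun p => p.2))).map
        (fun j => (j, (((l.filter (fun p => p.1 == i)).map (fun p => p.2)).count j : Int)))
      = ((PySem.Set.ofList l).filter (fun p => p.1 == i)).map (fun p => (p.2, (l.count p : Int))) := by
  have hinj : ∀ x ∈ l.filter (fun p => p.1 == i), ∀ y ∈ l.filter (fun p => p.1 == i), x.2 = y.2 → x = y := by
    intro x hx y hy hxy
    have hx1 : x.1 = i := by simpa using (List.mem_filter.mp hx).2
    have hy1 : y.1 = i := by simpa using (List.mem_filter.mp hy).2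
    exact Prod.ext_iff.mpr ⟨hx1.trans hy1.symm, hxy⟩
  rw [ofList_map_injOn _ _ hinj, ← ofList_filter, List.map_map]
  apply List.map_congr_left
  intro p hp
  have hp' : p ∈ l.filter (fun q => q.1 == i) := (PySem.Set.mem_ofList _ _).mp hp
  have hp1 : p.1 = i := by simpa using (List.mem_filter.mp hp').2
  simp only [Function.comp]
  rw [count_snd_filter l i p hp1]

theorem AB_eq (l : List (String × String)) :
    bigrams_counts_dictionary l = bigrams_counts_dictionary_alt l := by
  rw [portA_eq, portB_eq]
  have hA : (l.foldl aStep PySem.Dict.empty).keys.Nodup := by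
    rw [keysA]; exact PySem.Set.nodup_ofList _
  have hB : (((PySem.Dict.counter l).items).foldl dStep PySem.Dict.empty).keys.Nodup := by
    rw [keysB]; exact PySem.Set.nodup_ofList _
  rw [PySem.Dict.items_eq_map_keys _ hA PySem.Dict.empty,
      PySem.Dict.items_eq_map_keys _ hB PySem.Dict.empty, keysA, keysB]
  have hkeys : PySem.Set.ofList (((PySem.Dict.counter l).items).map (fun q => q.1.1))
      = PySem.Set.ofList (l.map (fun p => p.1)) := by
    rw [PySem.Dict.items_counter, List.map_map]
    have hc : ((fun q : (String × String) × Int => q.1.1) ∘ (fun k : String × String => (k, (List.count k l : Int))))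
        = fun k : String × String => k.1 := rfl
    rw [hc]
    exact ofList_map_ofList (fun p => p.1) l
  rw [hkeys, List.map_map, List.map_map]
  apply List.map_congr_left
  intro i _
  simp only [Function.comp]
  rw [innerA, innerB, inner_eq]

-- ===== VERDICT (by name: the statement is the Claim_ definition above) =====
theorem bigrams_counts_dictionary_spec : Claim_equal_bigrams_counts_dictionary := by
  intro l _
  exact AB_eq l
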